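-- pv_equiv track=rewrite | github.com/gradio-app/gradio | demo/test_chatinterface_examples/eager_caching_examples_testcase.py | generate
-- ===== SOURCE A (Python) =====
-- def generate(
--     message: str,
--     chat_history: list[dict],
-- ):
--
--     output = ""
--     for character in message:
--         output += character
--         yield output
-- ===== SOURCE B (Python) =====
-- def generate(
--     message: str,
--     chat_history: list[dict],
-- ):
--     for i in range(1, len(message) + 1):
--         yield message[:i]
-- ===== Notes on version B (the rewrite author's own statement) =====
-- stated objective: idiomatic
-- what changed: Replaces the running accumulator string (output += character) with a stateless index loop that yields each prefix directly as a slice message[:i].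
import Mathlib
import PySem

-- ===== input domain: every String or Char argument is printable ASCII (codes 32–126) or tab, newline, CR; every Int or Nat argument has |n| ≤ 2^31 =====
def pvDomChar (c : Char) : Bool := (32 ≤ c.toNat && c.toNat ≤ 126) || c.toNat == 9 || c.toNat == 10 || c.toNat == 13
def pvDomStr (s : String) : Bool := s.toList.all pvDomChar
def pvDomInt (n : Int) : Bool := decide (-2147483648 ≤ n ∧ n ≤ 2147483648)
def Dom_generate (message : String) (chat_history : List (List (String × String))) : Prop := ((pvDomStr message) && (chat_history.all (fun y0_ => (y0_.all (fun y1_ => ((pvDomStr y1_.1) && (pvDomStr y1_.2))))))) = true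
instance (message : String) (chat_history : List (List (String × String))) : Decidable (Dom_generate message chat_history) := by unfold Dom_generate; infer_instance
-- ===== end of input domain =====

-- B drops A's running accumulator: it yields each prefix directly as the slice message[:i]. Equivalence is about the yielded sequence (as a list); chat_history is unused by both.
-- ===== PORT A =====
-- A: output = ""; for character in message: output += character; yield output
def generate (message : String) (chat_history : List (List (String × String))) : List String :=
  (message.toList.foldl
    (fun (st : List Char × List String) character =>
      let output := st.1 ++ [character]
      (output, st.2 ++ [String.ofList output]))
    ([], [])).2

-- ===== PORT B =====
-- B: for i in range(1, len(message) + 1): yield message[:i]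
def generate_alt (message : String) (chat_history : List (List (String × String))) : List String :=
  (PySem.List.pyRange 1 (PySem.Str.len message + 1) 1).map
    (fun i => PySem.Str.slice message none (some i))

-- ===== PRECONDITION & SPEC =====
def Spec_generate (message : String) (chat_history : List (List (String × String))) (out : List String) : Prop := out = generate_alt message chat_history
instance (message : String) (chat_history : List (List (String × String))) (out : List String) : Decidable (Spec_generate message chat_history out) := by unfold Spec_generate; infer_instance

-- ===== CLAIM (what is proved, stated in full; the proofs are below) =====
def Claim_equal_generate : Prop := ∀ (message : String) (chat_history : List (List (String × String))), Dom_generate message chat_history → Spec_generate message chat_history (generate message chat_history)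

-- ===== LEMMAS AND PROOFS =====

-- ===== VERDICT (by name: the statement is the Claim_ definition above) =====
lemma generate_fold_spec (l : List Char) (pre : List Char) (acc : List String) :
    (l.foldl
      (fun (st : List Char × List String) character =>
        let output := st.1 ++ [character]
        (output, st.2 ++ [String.ofList output]))
      (pre, acc)).2
    = acc ++ (List.range l.length).map (fun k => String.ofList (pre ++ l.take (k + 1))) := by
  induction l generalizing pre acc with
  | nil => simp
  | cons c t ih =>
    simp only [List.foldl_cons, ih, List.length_cons, List.range_succ_eq_map, List.map_cons,
      List.map_map, List.take_succ_cons, List.append_assoc, List.cons_append, List.nil_append]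
    rfl

lemma generate_alt_eq (message : String) :
    generate_alt message [] = (List.range message.toList.length).map
      (fun k => String.ofList (message.toList.take (k + 1))) := by
  unfold generate_alt
  rw [PySem.List.pyRange_one]
  have hlen : PySem.Str.len message = (message.toList.length : Int) := by
    simp [PySem.Str.len_eq]
  rw [hlen]
  have : ((message.toList.length : Int) + 1 - 1).toNat = message.toList.length := by omega
  rw [this, List.map_map]
  refine List.map_congr_left (fun k hk => ?_)
  simp only [List.mem_range] at hk
  have h1 : (0:Int) ≤ 1 + (k : Int) := by omega
  simp only [Function.comp]
  rw [show PySem.Str.slice message none (some (1 + (k:Int)))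
      = String.ofList (message.toList.take (1 + (k:Int)).toNat) from by
    simp [PySem.Str.slice, PySem.List.slice_to _ h1, String.ofList]]
  have h2 : (1 + (k : Int)).toNat = k + 1 := by omega
  rw [h2]

lemma generate_alt_chat_irrel (message : String)
    (ch : List (List (String × String))) : generate_alt message ch = generate_alt message [] := rfl

theorem generate_spec : Claim_equal_generate := by
  intro message chat_history _
  unfold Spec_generate
  rw [generate_alt_chat_irrel, generate_alt_eq]
  unfold generate
  rw [generate_fold_spec]
  simp
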